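-- pv_equiv track=rewrite | github.com/ichenq/gist | src/py/pretty_ifdef.py | replace_ifdef_guard
-- ===== SOURCE A (Python) =====
-- def replace_ifdef_guard(text_lines):
--     guard_line = -1
--     end_line = -1
--     for i in range(len(text_lines)):
--         line = text_lines[i].strip()
--         if line.startswith("#ifndef"):
--             guard = line[8:].strip()
--             nextline = text_lines[i+1]
--             if nextline.startswith("#define"):
--                 name = nextline[8:].strip()
--                 if guard == name:
--                     guard_line = i
--             break
--
--     if guard_line >= 0:
--         for i in reversed(range(len(text_lines))):
--             line = text_lines[i].strip()
--             if line.startswith("#endif"):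
--                 end_line = i
--
--                 break
--     if guard_line >= 0 and end_line >= 0:
--         assert end_line > guard_line
--         text_lines[guard_line] = "#pragma once\n"
--         del text_lines[guard_line+1]
--         del text_lines[end_line-1]
--         return text_lines, True
--
--     return text_lines, False
-- ===== SOURCE B (Python) =====
-- def replace_ifdef_guard(text_lines):
--     # Single forward pass replacing A's two scans; mutates text_lines in place like A.
--     guard_line = -1
--     end_line = -1
--     seen_ifndef = False
--     for i in range(len(text_lines)):
--         line = text_lines[i].strip()
--         if not seen_ifndef and line.startswith("#ifndef"):
--             seen_ifndef = True
--             nextline = text_lines[i + 1]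
--             if nextline.startswith("#define") and line[8:].strip() == nextline[8:].strip():
--                 guard_line = i
--         if line.startswith("#endif"):
--             end_line = i
--     if guard_line >= 0 and end_line >= 0:
--         assert end_line > guard_line
--         text_lines[guard_line] = "#pragma once\n"
--         del text_lines[guard_line + 1]
--         del text_lines[end_line - 1]
--         return text_lines, True
--     return text_lines, False
-- ===== Notes on version B (the rewrite author's own statement) =====
-- stated objective: alternative
-- what changed: A's two scans (a forward break-at-first-#ifndef loop plus a separate backward break-at-first-#endif loop run only when a guard was found) are merged into one forward pass that uses a seen flag for the first #ifndef and keeps overwriting end_line so it ends at the last #endif.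
import Mathlib
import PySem

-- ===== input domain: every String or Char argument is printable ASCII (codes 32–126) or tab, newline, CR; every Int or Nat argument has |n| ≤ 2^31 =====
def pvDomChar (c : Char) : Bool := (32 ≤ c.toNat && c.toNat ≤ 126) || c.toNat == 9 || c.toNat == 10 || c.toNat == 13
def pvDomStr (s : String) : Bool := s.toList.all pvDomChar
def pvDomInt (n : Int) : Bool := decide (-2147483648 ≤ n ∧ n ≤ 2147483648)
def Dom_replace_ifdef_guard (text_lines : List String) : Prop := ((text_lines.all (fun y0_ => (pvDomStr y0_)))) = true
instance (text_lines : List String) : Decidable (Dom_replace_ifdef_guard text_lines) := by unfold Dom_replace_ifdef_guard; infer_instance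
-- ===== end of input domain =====

-- B replaces A's two scans (forward break-at-first-#ifndef + conditional backward break-at-first-#endif)
-- with one forward pass; same return value. Both Pythons mutate text_lines in place; the equivalence
-- proved here is about the return value.


-- ===== PORT A =====
-- A's first loop: break at the first stripped line starting with "#ifndef"; the text_lines[i+1]
-- access is ported with pyGet?/getD "" (Python raises IndexError there; Pre_ excludes that input).
def aGuardScan (text_lines : List String) (i : Nat) : Int :=
  if _h : i < text_lines.length then
    if PySem.Str.startswith (PySem.Str.strip (text_lines.getD i "")) "#ifndef" then
      if PySem.Str.startswith ((PySem.List.pyGet? text_lines ((i : Int) + 1)).getD "") "#define" then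
        if PySem.Str.strip (PySem.Str.slice (PySem.Str.strip (text_lines.getD i "")) (some 8) none)
            = PySem.Str.strip (PySem.Str.slice ((PySem.List.pyGet? text_lines ((i : Int) + 1)).getD "") (some 8) none)
        then (i : Int) else -1
      else -1
    else aGuardScan text_lines (i + 1)
  else -1
termination_by text_lines.length - i

-- A's second loop: reversed(range(n)), break at the first stripped line starting with "#endif".
def aEndScan (text_lines : List String) : Nat → Int
  | 0 => -1
  | n + 1 =>
    if PySem.Str.startswith (PySem.Str.strip (text_lines.getD n "")) "#endif" then (n : Int)
    else aEndScan text_lines n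

def replace_ifdef_guard (text_lines : List String) : List String × Bool :=
  let guard_line := aGuardScan text_lines 0
  let end_line := if guard_line ≥ 0 then aEndScan text_lines text_lines.length else -1
  if guard_line ≥ 0 ∧ end_line ≥ 0 then
    -- the assert end_line > guard_line always passes inside Pre_
    (((text_lines.set guard_line.toNat "#pragma once\n").eraseIdx (guard_line.toNat + 1)).eraseIdx
        (end_line.toNat - 1), true)
  else (text_lines, false)

-- ===== PORT B =====
-- B's single forward loop over i with state (seen_ifndef, guard_line, end_line).
def bScan (text_lines : List String) (i : Nat) (seen : Bool) (g e : Int) : Int × Int :=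
  if _h : i < text_lines.length then
    if seen = false ∧ PySem.Str.startswith (PySem.Str.strip (text_lines.getD i "")) "#ifndef" = true then
      if PySem.Str.startswith ((PySem.List.pyGet? text_lines ((i : Int) + 1)).getD "") "#define" = true ∧
          PySem.Str.strip (PySem.Str.slice (PySem.Str.strip (text_lines.getD i "")) (some 8) none)
            = PySem.Str.strip (PySem.Str.slice ((PySem.List.pyGet? text_lines ((i : Int) + 1)).getD "") (some 8) none) then
        bScan text_lines (i + 1) true (i : Int)
          (if PySem.Str.startswith (PySem.Str.strip (text_lines.getD i "")) "#endif" then (i : Int) else e)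
      else
        bScan text_lines (i + 1) true g
          (if PySem.Str.startswith (PySem.Str.strip (text_lines.getD i "")) "#endif" then (i : Int) else e)
    else
      bScan text_lines (i + 1) seen g
        (if PySem.Str.startswith (PySem.Str.strip (text_lines.getD i "")) "#endif" then (i : Int) else e)
  else (g, e)
termination_by text_lines.length - i

def replace_ifdef_guard_alt (text_lines : List String) : List String × Bool :=
  let ge := bScan text_lines 0 false (-1) (-1)
  if ge.1 ≥ 0 ∧ ge.2 ≥ 0 then
    (((text_lines.set ge.1.toNat "#pragma once\n").eraseIdx (ge.1.toNat + 1)).eraseIdx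
        (ge.2.toNat - 1), true)
  else (text_lines, false)

-- ===== PRECONDITION & SPEC =====
def ifndefP (s : String) : Bool := PySem.Str.startswith (PySem.Str.strip s) "#ifndef"
def endifP (s : String) : Bool := PySem.Str.startswith (PySem.Str.strip s) "#endif"
def guardMatchP (xs : List String) (i : Nat) : Bool :=
  PySem.Str.startswith (xs.getD (i + 1) "") "#define" &&
    (PySem.Str.strip (PySem.Str.slice (PySem.Str.strip (xs.getD i "")) (some 8) none)
      == PySem.Str.strip (PySem.Str.slice (xs.getD (i + 1) "") (some 8) none))

-- Pre_ excludes exactly the inputs on which Python A raises: an IndexError when the first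
-- "#ifndef" line is the last line, and an AssertionError when the guard matched but no
-- "#endif" lies after it (the last "#endif" not being past the guard).
def Pre_replace_ifdef_guard (text_lines : List String) : Prop :=
  ((text_lines.findIdx? ifndefP).all (fun i =>
      decide (i + 1 < text_lines.length) &&
        (!guardMatchP text_lines i || !text_lines.any endifP
          || (text_lines.drop (i + 1)).any endifP))) = true
instance (text_lines : List String) : Decidable (Pre_replace_ifdef_guard text_lines) := by
  unfold Pre_replace_ifdef_guard; infer_instance

def pvWitness_replace_ifdef_guard : List String :=
  ["#ifndef FOO_H\n", "#define FOO_H\n", "int x;\n", "#endif\n"]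

def Spec_replace_ifdef_guard (text_lines : List String) (out : List String × Bool) : Prop := out = replace_ifdef_guard_alt text_lines
instance (text_lines : List String) (out : List String × Bool) : Decidable (Spec_replace_ifdef_guard text_lines out) := by unfold Spec_replace_ifdef_guard; infer_instance

-- ===== CLAIM (what is proved, stated in full; the proofs are below) =====
def Claim_equal_replace_ifdef_guard : Prop := ∀ (text_lines : List String), Dom_replace_ifdef_guard text_lines → Pre_replace_ifdef_guard text_lines → Spec_replace_ifdef_guard text_lines (replace_ifdef_guard text_lines)

-- ===== LEMMAS AND PROOFS =====

-- forward "keep the last #endif index" scan: the e-component of bScan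
def fwdLast (xs : List String) (i : Nat) (e : Int) : Int :=
  if _h : i < xs.length then
    fwdLast xs (i + 1)
      (if PySem.Str.startswith (PySem.Str.strip (xs.getD i "")) "#endif" then (i : Int) else e)
  else e
termination_by xs.length - i

theorem bScan_seen (xs : List String) : ∀ k i g e, xs.length - i ≤ k →
    bScan xs i true g e = (g, fwdLast xs i e) := by
  intro k
  induction k with
  | zero =>
    intro i g e hk
    have h : ¬ i < xs.length := by omega
    rw [bScan, fwdLast, dif_neg h, dif_neg h]
  | succ k ih =>
    intro i g e hk
    rw [bScan, fwdLast]
    by_cases h : i < xs.length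
    · rw [dif_pos h, dif_pos h, if_neg (fun hc => Bool.true_eq_false.mp hc.1)]
      exact ih (i + 1) g _ (by omega)
    · rw [dif_neg h, dif_neg h]

set_option maxHeartbeats 1000000 in
theorem bScan_unseen (xs : List String) : ∀ k i e, xs.length - i ≤ k →
    bScan xs i false (-1) e = (aGuardScan xs i, fwdLast xs i e) := by
  intro k
  induction k with
  | zero =>
    intro i e hk
    have h : ¬ i < xs.length := by omega
    rw [bScan, fwdLast, aGuardScan, dif_neg h, dif_neg h, dif_neg h]
  | succ k ih =>
    intro i e hk
    rw [bScan, fwdLast, aGuardScan]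
    by_cases h : i < xs.length
    · rw [dif_pos h, dif_pos h, dif_pos h]
      by_cases hif : PySem.Str.startswith (PySem.Str.strip (xs.getD i "")) "#ifndef" = true
      · rw [if_pos (⟨rfl, hif⟩ : (false = false ∧ _)), if_pos hif]
        by_cases hd : PySem.Str.startswith ((PySem.List.pyGet? xs ((i : Int) + 1)).getD "") "#define" = true
        · by_cases heq : PySem.Str.strip (PySem.Str.slice (PySem.Str.strip (xs.getD i "")) (some 8) none)
              = PySem.Str.strip (PySem.Str.slice ((PySem.List.pyGet? xs ((i : Int) + 1)).getD "") (some 8) none)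
          · rw [if_pos (⟨hd, heq⟩ : (_ ∧ _)), if_pos hd, if_pos heq]
            exact bScan_seen xs (xs.length - (i + 1)) (i + 1) _ _ le_rfl
          · rw [if_neg (fun hc => heq hc.2), if_pos hd, if_neg heq]
            exact bScan_seen xs (xs.length - (i + 1)) (i + 1) _ _ le_rfl
        · rw [if_neg (fun hc => hd hc.1), if_neg hd]
          exact bScan_seen xs (xs.length - (i + 1)) (i + 1) _ _ le_rfl
      · rw [if_neg (fun hc => hif hc.2), if_neg hif]
        exact ih (i + 1) _ (by omega)
    · rw [dif_neg h, dif_neg h, dif_neg h]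

theorem fwdLast_eq_aEndScan (xs : List String) : ∀ k n, xs.length - n ≤ k → n ≤ xs.length →
    fwdLast xs n (aEndScan xs n) = aEndScan xs xs.length := by
  intro k
  induction k with
  | zero =>
    intro n hk hn
    have h : n = xs.length := by omega
    subst h
    rw [fwdLast, dif_neg (lt_irrefl _)]
  | succ k ih =>
    intro n hk hn
    by_cases h : n < xs.length
    · rw [fwdLast, dif_pos h]
      have hstep : (if PySem.Str.startswith (PySem.Str.strip (xs.getD n "")) "#endif"
          then (n : Int) else aEndScan xs n) = aEndScan xs (n + 1) := by
        rw [aEndScan]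
      rw [hstep]
      exact ih (n + 1) (by omega) (by omega)
    · have hn' : n = xs.length := by omega
      subst hn'
      rw [fwdLast, dif_neg (lt_irrefl _)]

-- ===== VERDICT (by name: the statement is the Claim_ definition above) =====
theorem replace_ifdef_guard_spec : Claim_equal_replace_ifdef_guard := by
  unfold Claim_equal_replace_ifdef_guard
  intro xs _hDom _hPre
  have he : fwdLast xs 0 (-1) = aEndScan xs xs.length :=
    fwdLast_eq_aEndScan xs xs.length 0 (by omega) (by omega)
  have hb : bScan xs 0 false (-1) (-1) = (aGuardScan xs 0, aEndScan xs xs.length) := by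
    rw [bScan_unseen xs xs.length 0 (-1) (by omega), he]
  unfold Spec_replace_ifdef_guard replace_ifdef_guard replace_ifdef_guard_alt
  rw [hb]
  by_cases hg : aGuardScan xs 0 ≥ 0
  · simp only [hg, if_true]
  · simp [hg]
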